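-- pv_equiv track=rewrite | github.com/Barraganri/FinalEPC | Proyecto.py | etiqutasDic
-- ===== SOURCE A (Python) =====
-- def etiqutasDic(lista, dic):
--     dicAux = {}
--     for i in dic:
--         for j in range(len(lista)):
--             if(j < len(lista)-1):
--                 if i == lista[j]:
--                     dicAux[i] = lista[j+1]
--     return dicAux
-- ===== SOURCE B (Python) =====
-- def etiqutasDic(lista, dic):
--     # One pass over lista: nxt[x] = element following the last occurrence of x
--     # (positions up to len(lista)-2, exactly the ones A's guard admits).
--     nxt = {}
--     for j in range(len(lista) - 1):
--         nxt[lista[j]] = lista[j + 1]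
--     return {k: nxt[k] for k in dic if k in nxt}
-- ===== Notes on version B (the rewrite author's own statement) =====
-- stated objective: faster
-- what changed: A rescans the whole list once per dict key (nested loops); B builds a successor dict in one pass over the list and then looks each key up, removing the inner scan.
import Mathlib
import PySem

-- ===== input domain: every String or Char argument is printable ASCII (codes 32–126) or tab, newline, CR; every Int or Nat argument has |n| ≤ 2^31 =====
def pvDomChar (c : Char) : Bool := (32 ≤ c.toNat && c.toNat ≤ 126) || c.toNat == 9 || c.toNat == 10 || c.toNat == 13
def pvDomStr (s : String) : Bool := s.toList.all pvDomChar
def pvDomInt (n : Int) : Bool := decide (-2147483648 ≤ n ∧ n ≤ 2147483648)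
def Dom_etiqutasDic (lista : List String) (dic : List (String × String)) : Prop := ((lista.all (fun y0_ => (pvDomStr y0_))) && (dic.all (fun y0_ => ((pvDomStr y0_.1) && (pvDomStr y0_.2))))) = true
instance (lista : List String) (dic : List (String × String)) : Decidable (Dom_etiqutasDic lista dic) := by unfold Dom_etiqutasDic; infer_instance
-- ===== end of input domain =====

-- B replaces A's per-key rescan of `lista` with a single successor-index pass plus lookups (faster, asymptotic in a timing run).


-- ===== PORT A =====
-- `lista[j]` / `lista[j+1]` are read only under the guard `j < len(lista)-1`, so both
-- indices are in range; `pyGetD … ""` is exact there.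
def etiqutasDic (lista : List String) (dic : List (String × String)) : List (String × String) :=
  (dic.foldl (fun dicAux i =>
      (PySem.List.pyRange 0 (PySem.List.len lista) 1).foldl (fun dicAux j =>
        if j < PySem.List.len lista - 1 then
          if i.1 == PySem.List.pyGetD lista j "" then
            dicAux.insert i.1 (PySem.List.pyGetD lista (j + 1) "")
          else dicAux
        else dicAux) dicAux)
    PySem.Dict.empty).items

-- ===== PORT B =====
-- Indices j and j+1 of the build loop are in range (j < len(lista)-1); `pyGetD … ""` is exact.
def etiqutasDic_alt (lista : List String) (dic : List (String × String)) : List (String × String) :=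
  let nxt := (PySem.List.pyRange 0 (PySem.List.len lista - 1) 1).foldl
      (fun d j => d.insert (PySem.List.pyGetD lista j "") (PySem.List.pyGetD lista (j + 1) ""))
      PySem.Dict.empty
  (dic.foldl (fun acc k =>
      match nxt.get? k.1 with
      | some v => acc.insert k.1 v
      | none => acc)
    PySem.Dict.empty).items

-- ===== PRECONDITION & SPEC =====
def Spec_etiqutasDic (lista : List String) (dic : List (String × String)) (out : List (String × String)) : Prop := out = etiqutasDic_alt lista dic
instance (lista : List String) (dic : List (String × String)) (out : List (String × String)) : Decidable (Spec_etiqutasDic lista dic out) := by unfold Spec_etiqutasDic; infer_instance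

-- ===== CLAIM (what is proved, stated in full; the proofs are below) =====
def Claim_equal_etiqutasDic : Prop := ∀ (lista : List String) (dic : List (String × String)), Dom_etiqutasDic lista dic → Spec_etiqutasDic lista dic (etiqutasDic lista dic)

-- ===== LEMMAS AND PROOFS =====

-- adjacent pairs of `lista`: positions (j, j+1) for j ≤ len-2
def pvPairs (lista : List String) : List (String × String) := lista.zip lista.tail

-- value after the LAST occurrence of k among the pairs
def lookupLast (k : String) : List (String × String) → Option String
  | [] => none
  | p :: rest =>
    match lookupLast k rest with
    | some v => some v
    | none => if k == p.1 then some p.2 else none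

theorem pvPairs_length (lista : List String) : (pvPairs lista).length = lista.length - 1 := by
  cases lista with
  | nil => rfl
  | cons x xs => simp [pvPairs]

theorem pvPairs_get (lista : List String) (j : Nat) (h : j < (pvPairs lista).length) :
    (pvPairs lista)[j] = (lista[j]'(by have := pvPairs_length lista; omega),
      lista[j+1]'(by have := pvPairs_length lista; omega)) := by
  simp [pvPairs, List.getElem_tail]

-- a fold over range(len(lista)-1) reading lista[j], lista[j+1] is a fold over pvPairs
theorem foldl_pairs {β : Type} (lista : List String) (f : β → (String × String) → β) (init : β) :
    (PySem.List.pyRange 0 (PySem.List.len lista - 1) 1).foldl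
      (fun acc j => f acc (PySem.List.pyGetD lista j "", PySem.List.pyGetD lista (j + 1) "")) init
    = (pvPairs lista).foldl f init := by
  cases lista with
  | nil =>
    rw [show PySem.List.len ([] : List String) - 1 = -1 by simp [PySem.List.len],
      PySem.List.pyRange_one_eq_nil (by omega)]
    rfl
  | cons x xs =>
    have hlen : PySem.List.len (x :: xs) - 1 = ((pvPairs (x :: xs)).length : Int) := by
      rw [pvPairs_length]; simp [PySem.List.len]
    rw [hlen]
    rw [PySem.List.foldl_congr_mem _ _
      (fun acc j => f acc (PySem.List.pyGetD (pvPairs (x :: xs)) j ("", ""))) init ?_]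
    · exact PySem.List.foldl_pyRange_zero_pyGetD' (pvPairs (x :: xs)) ("", "") f init
    · intro acc j hj
      rw [PySem.List.mem_pyRange_one] at hj
      have h0 : (0 : Int) ≤ j := hj.1
      have hjn : j.toNat < (pvPairs (x :: xs)).length := by omega
      have hl := pvPairs_length (x :: xs)
      show f acc (PySem.List.pyGetD (x :: xs) j "", PySem.List.pyGetD (x :: xs) (j + 1) "")
        = f acc (PySem.List.pyGetD (pvPairs (x :: xs)) j ("", ""))
      rw [PySem.List.pyGetD_of_nonneg _ _ h0,
        PySem.List.pyGetD_of_nonneg _ _ (by omega : (0 : Int) ≤ j + 1),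
        PySem.List.pyGetD_of_nonneg _ _ h0,
        show (j + 1).toNat = j.toNat + 1 by omega,
        List.getD_eq_getElem _ _ hjn, pvPairs_get _ _ hjn,
        List.getD_eq_getElem _ _ (by omega : j.toNat < (x :: xs).length),
        List.getD_eq_getElem _ _ (by omega : j.toNat + 1 < (x :: xs).length)]

-- A's inner loop over range(len(lista)): the j = len-1 slot is a no-op, the rest is a pvPairs fold
theorem innerA_eq (lista : List String) (k : String) (acc : PySem.Dict String String) :
    (PySem.List.pyRange 0 (PySem.List.len lista) 1).foldl (fun dicAux j =>
        if j < PySem.List.len lista - 1 then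
          if k == PySem.List.pyGetD lista j "" then
            dicAux.insert k (PySem.List.pyGetD lista (j + 1) "")
          else dicAux
        else dicAux) acc
    = (pvPairs lista).foldl (fun d p => if k == p.1 then d.insert k p.2 else d) acc := by
  cases lista with
  | nil =>
    rw [show PySem.List.len ([] : List String) = 0 by simp [PySem.List.len],
      PySem.List.pyRange_one_eq_nil le_rfl]
    rfl
  | cons x xs =>
    have hn : (1 : Int) ≤ PySem.List.len (x :: xs) := by simp [PySem.List.len]
    have hsing : PySem.List.pyRange (PySem.List.len (x :: xs) - 1) (PySem.List.len (x :: xs))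
        = [PySem.List.len (x :: xs) - 1] := by
      have h := PySem.List.pyRange_one_singleton (PySem.List.len (x :: xs) - 1)
      rwa [show PySem.List.len (x :: xs) - 1 + 1 = PySem.List.len (x :: xs) by ring] at h
    rw [PySem.List.pyRange_one_append 0 (PySem.List.len (x :: xs) - 1) (PySem.List.len (x :: xs))
        (by omega) (by omega), List.foldl_append, hsing]
    simp only [List.foldl_cons, List.foldl_nil, lt_irrefl, if_false]
    rw [← foldl_pairs (x :: xs) (fun d p => if k == p.1 then d.insert k p.2 else d) acc]
    apply PySem.List.foldl_congr_mem
    intro a j hj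
    rw [PySem.List.mem_pyRange_one] at hj
    rw [if_pos hj.2]

-- a conditional-insert fold at a single key is `insert` at the last matching pair (or a no-op)
theorem foldl_ite_insert (ps : List (String × String)) (k : String) (acc : PySem.Dict String String) :
    ps.foldl (fun d p => if k == p.1 then d.insert k p.2 else d) acc
    = match lookupLast k ps with
      | some v => acc.insert k v
      | none => acc := by
  induction ps generalizing acc with
  | nil => rfl
  | cons p rest ih =>
    simp only [List.foldl_cons, lookupLast, ih]
    cases hrest : lookupLast k rest with
    | some v =>
      by_cases hk : k == p.1
      · simp [hk, PySem.Dict.insert_insert_self]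
      · simp [hk]
    | none =>
      by_cases hk : k == p.1
      · simp [hk]
      · simp [hk]

-- lookup in the dict built by an unconditional insert fold is lookupLast
theorem get?_foldl_insert (ps : List (String × String)) (k : String) (d : PySem.Dict String String) :
    (ps.foldl (fun d p => d.insert p.1 p.2) d).get? k
    = match lookupLast k ps with
      | some v => some v
      | none => d.get? k := by
  induction ps generalizing d with
  | nil => rfl
  | cons p rest ih =>
    simp only [List.foldl_cons, lookupLast, ih]
    cases hrest : lookupLast k rest with
    | some v => rfl
    | none =>
      rw [PySem.Dict.get?_insert]
      by_cases hk : k = p.1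
      · simp [hk]
      · simp [hk, (by simpa using hk : ¬ (k == p.1) = true)]

-- ===== VERDICT (by name: the statement is the Claim_ definition above) =====
theorem etiqutasDic_spec : Claim_equal_etiqutasDic := by
  intro lista dic _
  unfold Spec_etiqutasDic etiqutasDic etiqutasDic_alt
  congr 1
  apply PySem.List.foldl_congr_mem
  intro acc i _
  rw [innerA_eq lista i.1 acc, foldl_ite_insert,
    show (PySem.List.pyRange 0 (PySem.List.len lista - 1) 1).foldl
        (fun d j => d.insert (PySem.List.pyGetD lista j "") (PySem.List.pyGetD lista (j + 1) ""))
        PySem.Dict.empty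
      = (pvPairs lista).foldl (fun d p => d.insert p.1 p.2) PySem.Dict.empty
      from foldl_pairs lista (fun d p => d.insert p.1 p.2) PySem.Dict.empty,
    get?_foldl_insert]
  cases lookupLast i.1 (pvPairs lista) with
  | some v => rfl
  | none => rfl
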